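-- pv_equiv track=rewrite | github.com/lanccc03/replay_tool | src/replay_tool/domain/model.py | canfd_payload_length_to_dlc
-- ===== SOURCE A (Python) =====
-- CANFD_PAYLOAD_LENGTHS_BY_DLC = {
--     0x0: 0,
--     0x1: 1,
--     0x2: 2,
--     0x3: 3,
--     0x4: 4,
--     0x5: 5,
--     0x6: 6,
--     0x7: 7,
--     0x8: 8,
--     0x9: 12,
--     0xA: 16,
--     0xB: 20,
--     0xC: 24,
--     0xD: 32,
--     0xE: 48,
--     0xF: 64,
-- }
--
-- def canfd_payload_length_to_dlc(payload_length: int) -> int: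
--     """Convert a CAN FD payload length to the smallest valid DLC.
--
--     Args:
--         payload_length: Payload size in bytes.
--
--     Returns:
--         The CAN FD data length code that can carry the payload.
--
--     Raises:
--         ValueError: If the payload length is negative or exceeds 64 bytes.
--     """
--     length = int(payload_length)
--     if length < 0:
--         raise ValueError("CANFD payload length cannot be negative.")
--     if length <= 8:
--         return length
--     for dlc, allowed_length in CANFD_PAYLOAD_LENGTHS_BY_DLC.items():
--         if allowed_length >= length:
--             return dlc
--     raise ValueError(f"CANFD payload length exceeds 64 bytes: {length}")
-- ===== SOURCE B (Python) =====
-- _LARGE_DLC_CAPACITIES = [12, 16, 20, 24, 32, 48, 64]  # capacities for DLC 9..15, ascending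
--
--
-- def _bisect_left(xs, x):
--     """Leftmost insertion point for x in sorted xs (hand-written binary search)."""
--     lo, hi = 0, len(xs)
--     while lo < hi:
--         mid = (lo + hi) // 2
--         if xs[mid] < x:
--             lo = mid + 1
--         else:
--             hi = mid
--     return lo
--
--
-- def canfd_payload_length_to_dlc(payload_length: int) -> int:
--     length = int(payload_length)
--     if length < 0:
--         raise ValueError("CANFD payload length cannot be negative.")
--     if length <= 8:
--         return length
--     i = _bisect_left(_LARGE_DLC_CAPACITIES, length)
--     if i < len(_LARGE_DLC_CAPACITIES):
--         return 9 + i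
--     raise ValueError(f"CANFD payload length exceeds 64 bytes: {length}")
-- ===== Notes on version B (the rewrite author's own statement) =====
-- stated objective: alternative
-- what changed: Replaces A's linear scan over the full DLC-to-capacity dict with a hand-written binary search (bisect_left) over the ascending capacity table of the large DLCs, returning the base large DLC plus the found index.
import Mathlib
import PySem

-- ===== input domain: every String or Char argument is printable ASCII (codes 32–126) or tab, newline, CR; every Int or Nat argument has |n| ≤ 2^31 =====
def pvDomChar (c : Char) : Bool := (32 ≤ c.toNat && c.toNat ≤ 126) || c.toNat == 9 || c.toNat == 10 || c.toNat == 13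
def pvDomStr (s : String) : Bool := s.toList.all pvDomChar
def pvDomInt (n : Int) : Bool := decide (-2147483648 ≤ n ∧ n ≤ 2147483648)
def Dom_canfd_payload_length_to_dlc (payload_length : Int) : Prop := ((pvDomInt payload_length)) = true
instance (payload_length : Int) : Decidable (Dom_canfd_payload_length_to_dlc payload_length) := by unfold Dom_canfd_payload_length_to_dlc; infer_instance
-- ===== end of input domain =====

-- B replaces A's linear scan of the 16-entry DLC dict with a binary search over the
-- ascending 7-entry capacity table for DLC 9..15 (alternative decomposition, not faster).

-- ===== PORT A =====
-- the module-level dict CANFD_PAYLOAD_LENGTHS_BY_DLC as an association list (insertion order)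
def canfdTable : List (Int × Int) :=
  [(0,0),(1,1),(2,2),(3,3),(4,4),(5,5),(6,6),(7,7),(8,8),
   (9,12),(10,16),(11,20),(12,24),(13,32),(14,48),(15,64)]

-- the 'for dlc, allowed_length in ….items(): if allowed_length >= length: return dlc' loop;
-- [] is the fall-through 'raise ValueError' (excluded by Pre_), modelled as 0
def canfdScan (length : Int) : List (Int × Int) → Int
  | [] => 0
  | (dlc, allowed) :: rest => if allowed ≥ length then dlc else canfdScan length rest

def canfd_payload_length_to_dlc (payload_length : Int) : Int :=
  let length := payload_length
  if length < 0 then 0          -- raise ValueError (excluded by Pre_)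
  else if length ≤ 8 then length
  else canfdScan length canfdTable

-- ===== PORT B =====
def largeDlcCapacities : List Int := [12, 16, 20, 24, 32, 48, 64]

-- hand-written bisect_left: 'while lo < hi' binary search; the fuel argument only
-- bounds the iteration count for totality (hi - lo shrinks every step, so
-- fuel = xs.length always suffices) and never changes the computed value
def bisectLeftGo (xs : List Int) (x : Int) : Nat → Nat → Nat → Nat
  | 0, lo, _ => lo
  | fuel + 1, lo, hi =>
    if lo < hi then
      let mid := (lo + hi) / 2
      if ((PySem.List.pyGet? xs (Int.ofNat mid)).getD 0) < x then
        bisectLeftGo xs x fuel (mid + 1) hi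
      else
        bisectLeftGo xs x fuel lo mid
    else lo

def bisectLeft (xs : List Int) (x : Int) : Nat :=
  bisectLeftGo xs x xs.length 0 xs.length

def canfd_payload_length_to_dlc_alt (payload_length : Int) : Int :=
  let length := payload_length
  if length < 0 then 0          -- raise ValueError (excluded by Pre_)
  else if length ≤ 8 then length
  else
    let i := bisectLeft largeDlcCapacities length
    if i < largeDlcCapacities.length then 9 + Int.ofNat i
    else 0                      -- raise ValueError (excluded by Pre_)

-- ===== PRECONDITION & SPEC =====
-- Pre_ excludes exactly the inputs where A raises ValueError: negative lengths and lengths > 64.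
def Pre_canfd_payload_length_to_dlc (payload_length : Int) : Prop :=
  0 ≤ payload_length ∧ payload_length ≤ 64
instance (payload_length : Int) : Decidable (Pre_canfd_payload_length_to_dlc payload_length) := by unfold Pre_canfd_payload_length_to_dlc; infer_instance

def pvWitness_canfd_payload_length_to_dlc : Int := 13

def Spec_canfd_payload_length_to_dlc (payload_length : Int) (out : Int) : Prop := out = canfd_payload_length_to_dlc_alt payload_length
instance (payload_length : Int) (out : Int) : Decidable (Spec_canfd_payload_length_to_dlc payload_length out) := by unfold Spec_canfd_payload_length_to_dlc; infer_instance

-- ===== CLAIM (what is proved, stated in full; the proofs are below) =====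
def Claim_equal_canfd_payload_length_to_dlc : Prop := ∀ (payload_length : Int), Dom_canfd_payload_length_to_dlc payload_length → Pre_canfd_payload_length_to_dlc payload_length → Spec_canfd_payload_length_to_dlc payload_length (canfd_payload_length_to_dlc payload_length)

-- ===== LEMMAS AND PROOFS =====

-- ===== VERDICT (by name: the statement is the Claim_ definition above) =====
theorem canfd_payload_length_to_dlc_spec : Claim_equal_canfd_payload_length_to_dlc := by
  intro n _ hpre
  obtain ⟨h0, h64⟩ := hpre
  unfold Spec_canfd_payload_length_to_dlc
  interval_cases n <;> decide
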